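-- pv_equiv track=rewrite | github.com/safimuhammad/leetcode-problems | leetcode.py | solution
-- ===== SOURCE A (Python) =====
-- def solution(s):
--     list_s=list(s)
--     res=[]
--     for i in range(0,len(s)):
--         if list_s[i]==0:
--             continue
--         if len(s) %2 ==0:
--             if i==len(s)-1:
--                 break
--             else:
--                 res.append(list_s[i]+list_s[i+1])
--                 list_s[i]=0
--                 list_s[i+1]=0
--         elif len(list_s) %2 != 0:
--             if i == len(list_s)-1:
--                 res.append(list_s[i]+'_')
--                 break
--             else:
--                 res.append(list_s[i]+list_s[i+1])
--                 list_s[i]=0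
--                 list_s[i+1]=0
--     return res
-- ===== SOURCE B (Python) =====
-- def solution(s):
--     res = []
--     for i in range(0, len(s), 2):
--         if i + 1 < len(s):
--             res.append(s[i] + s[i + 1])
--         else:
--             res.append(s[i] + '_')
--     return res
-- ===== Notes on version B (the rewrite author's own statement) =====
-- stated objective: simpler
-- what changed: Replaces the mutable list copy with 0-sentinel marking and per-index skip logic by a direct stride-2 loop over the indices, appending the two-char pair or an underscore-padded final char.
import Mathlib
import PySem

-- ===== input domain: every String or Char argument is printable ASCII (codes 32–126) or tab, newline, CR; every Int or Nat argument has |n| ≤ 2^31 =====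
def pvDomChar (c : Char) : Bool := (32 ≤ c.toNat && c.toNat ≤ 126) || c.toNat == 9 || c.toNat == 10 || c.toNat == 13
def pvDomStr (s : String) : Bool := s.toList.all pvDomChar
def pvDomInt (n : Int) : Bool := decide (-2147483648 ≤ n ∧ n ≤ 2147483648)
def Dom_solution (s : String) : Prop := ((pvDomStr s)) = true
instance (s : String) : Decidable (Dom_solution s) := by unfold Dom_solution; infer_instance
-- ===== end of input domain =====

-- B replaces A's mutable copy with 0-sentinel marking by a direct stride-2 index loop (simpler).

-- ===== PORT A =====
-- state: list_s as List (Option Char), 'none' plays the role of the 0 sentinel written by A.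
-- the '| _ => res' fallbacks are unreachable in Python (they would be a TypeError on 0+char);
-- they are never hit because unmarked positions always hold characters in pairs.
def solutionA_loop (n : Nat) (i : Nat) (ls : List (Option Char)) (res : List String) : List String :=
  if _h : i < n then
    match ls[i]? with
    | some none => solutionA_loop n (i + 1) ls res          -- list_s[i] == 0 → continue
    | some (some c) =>
      if n % 2 == 0 then
        if i == n - 1 then res                               -- break
        else
          match ls[i + 1]? with
          | some (some d) =>
              solutionA_loop n (i + 1) ((ls.set i none).set (i + 1) none)
                (res ++ [String.mk [c, d]])
          | _ => res
      else                                                   -- elif len(list_s) % 2 != 0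
        if i == n - 1 then res ++ [String.mk [c, '_']]       -- append then break
        else
          match ls[i + 1]? with
          | some (some d) =>
              solutionA_loop n (i + 1) ((ls.set i none).set (i + 1) none)
                (res ++ [String.mk [c, d]])
          | _ => res
    | none => res
  else res
termination_by n - i

def solution (s : String) : List String :=
  solutionA_loop s.toList.length 0 (s.toList.map some) []

-- ===== PORT B =====
def solution_alt (s : String) : List String :=
  (PySem.List.pyRange 0 (s.toList.length : Int) 2).foldl
    (fun res i =>
      if i + 1 < (s.toList.length : Int) then
        res ++ [match PySem.List.pyGet? s.toList i, PySem.List.pyGet? s.toList (i + 1) with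
                | some c, some d => String.mk [c, d]
                | _, _ => ""]
      else
        res ++ [match PySem.List.pyGet? s.toList i with
                | some c => String.mk [c, '_']
                | _ => ""]) []

-- ===== PRECONDITION & SPEC =====
def Spec_solution (s : String) (out : List String) : Prop := out = solution_alt s
instance (s : String) (out : List String) : Decidable (Spec_solution s out) := by unfold Spec_solution; infer_instance

-- ===== CLAIM (what is proved, stated in full; the proofs are below) =====
def Claim_equal_solution : Prop := ∀ (s : String), Dom_solution s → Spec_solution s (solution s)

-- ===== LEMMAS AND PROOFS =====

-- common specification: pair up adjacent chars, '_'-pad an odd tail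
def pairs : List Char → List String
  | [] => []
  | [c] => [String.mk [c, '_']]
  | c :: d :: t => String.mk [c, d] :: pairs t

theorem setpair (c d : Char) : ∀ (i : Nat) (m : List (Option Char)),
    ((List.replicate i (none : Option Char) ++ some c :: some d :: m).set i none).set (i + 1) none
      = List.replicate (i + 2) none ++ m := by
  intro i
  induction i with
  | zero => intro m; simp
  | succ k ih =>
    intro m
    simp only [List.replicate_succ, List.cons_append, List.set_cons_succ]
    rw [ih m]
    rfl

theorem getRep {α : Type} (i k : Nat) (l : List (Option α)) :
    (List.replicate i (none : Option α) ++ l)[i + k]? = l[k]? := by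
  rw [List.getElem?_append_right (by simp)]
  simp

theorem lemA : ∀ (t : List Char) (i : Nat) (res : List String), i % 2 = 0 →
    solutionA_loop (i + t.length) i (List.replicate i none ++ t.map some) res
      = res ++ pairs t := by
  intro t
  match t with
  | [] =>
    intro i res _
    unfold solutionA_loop
    simp [pairs]
  | [c] =>
    intro i res h2
    unfold solutionA_loop
    have hget : (List.replicate i (none : Option Char) ++ [some c])[i]? = some (some c) := by
      have := getRep i 0 [some c]; simpa using this
    have hm : (i + 1) % 2 ≠ 0 := by omega
    simp [hget, hm, pairs]
  | c :: d :: t' =>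
    intro i res h2
    have hlen : (c :: d :: t').length = t'.length + 2 := by simp
    have hne : i ≠ i + (c :: d :: t').length - 1 := by omega
    have hget : (List.replicate i (none : Option Char) ++ (c :: d :: t').map some)[i]?
        = some (some c) := by
      have := getRep i 0 ((c :: d :: t').map some); simpa using this
    have hget1 : (List.replicate i (none : Option Char) ++ (c :: d :: t').map some)[i + 1]?
        = some (some d) := by
      have := getRep i 1 ((c :: d :: t').map some); simpa using this
    have hset : ((List.replicate i (none : Option Char) ++ (c :: d :: t').map some).set i none).set (i + 1) none
        = List.replicate (i + 2) none ++ t'.map some := by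
      have := setpair c d i (t'.map some); simpa using this
    have hget2 : (List.replicate (i + 2) (none : Option Char) ++ t'.map some)[i + 1]? = some none := by
      have h : i + 1 < i + 2 := by omega
      rw [List.getElem?_append_left (by simp [h])]
      simp [h]
    -- one pair step, then the skip of the marked index i+1
    have step : solutionA_loop (i + (c :: d :: t').length) i
        (List.replicate i none ++ (c :: d :: t').map some) res
        = solutionA_loop (i + (c :: d :: t').length) (i + 2)
            (List.replicate (i + 2) none ++ t'.map some) (res ++ [String.mk [c, d]]) := by
      rw [solutionA_loop]
      simp only [hget]
      have h1 : i < i + (c :: d :: t').length := by simp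
      rw [dif_pos h1]
      by_cases hpar : (i + (c :: d :: t').length) % 2 = 0
      · simp only [hpar, beq_self_eq_true, if_true]
        rw [if_neg (by simpa using hne)]
        simp only [hget1, hset]
        -- skip step at i+1
        rw [solutionA_loop]
        have h2' : i + 1 < i + (c :: d :: t').length := by simp only [hlen]; omega
        rw [dif_pos h2']
        simp only [hget2]
      · rw [if_neg (fun hT => hpar (by simpa using hT))]
        rw [if_neg (by simpa using hne)]
        simp only [hget1, hset]
        rw [solutionA_loop]
        have h2' : i + 1 < i + (c :: d :: t').length := by simp only [hlen]; omega
        rw [dif_pos h2']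
        simp only [hget2]
    rw [step]
    have harith : i + (c :: d :: t').length = (i + 2) + t'.length := by simp only [hlen]; omega
    rw [harith, lemA t' (i + 2) (res ++ [String.mk [c, d]]) (by omega)]
    simp [pairs]
termination_by t => t.length

theorem pyRange2_cons (a b : Int) (h : a < b) :
    PySem.List.pyRange a b 2 = a :: PySem.List.pyRange (a + 2) b 2 := by
  rw [PySem.List.pyRange_of_pos a b (by norm_num),
      PySem.List.pyRange_of_pos (a + 2) b (by norm_num)]
  have hc : (if a < b then ((b - a + 2 - 1) / 2).toNat else 0)
      = (if a + 2 < b then ((b - (a + 2) + 2 - 1) / 2).toNat else 0) + 1 := by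
    split_ifs <;> omega
  rw [hc, List.range_succ_eq_map]
  simp only [List.map_cons, List.map_map, Nat.cast_zero, mul_zero, add_zero]
  congr 1
  apply List.map_congr_left
  intro k _
  simp only [Function.comp_apply, Nat.succ_eq_add_one]
  push_cast
  ring

theorem lemB (cs : List Char) : ∀ (t : List Char) (i : Nat) (res : List String),
    cs.drop i = t →
    (PySem.List.pyRange (i : Int) (cs.length : Int) 2).foldl
      (fun res j =>
        if j + 1 < (cs.length : Int) then
          res ++ [match PySem.List.pyGet? cs j, PySem.List.pyGet? cs (j + 1) with
                  | some c, some d => String.mk [c, d]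
                  | _, _ => ""]
        else
          res ++ [match PySem.List.pyGet? cs j with
                  | some c => String.mk [c, '_']
                  | _ => ""]) res
      = res ++ pairs t := by
  intro t
  match t with
  | [] =>
    intro i res hdrop
    have hi : cs.length ≤ i := by
      by_contra h
      have := List.drop_eq_nil_iff.mp hdrop
      omega
    rw [PySem.List.pyRange_of_pos _ _ (by norm_num)]
    rw [if_neg (by exact_mod_cast Nat.not_lt.mpr hi)]
    simp [pairs]
  | [c] =>
    intro i res hdrop
    have hi : i + 1 = cs.length := by
      have := congrArg List.length hdrop
      simp at this
      omega
    have hlt : (i : Int) < (cs.length : Int) := by exact_mod_cast by omega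
    rw [pyRange2_cons _ _ hlt]
    have hend : PySem.List.pyRange ((i : Int) + 2) (cs.length : Int) 2 = [] := by
      rw [PySem.List.pyRange_of_pos _ _ (by norm_num)]
      rw [if_neg (by push_cast; omega)]
      simp
    rw [List.foldl_cons, hend, List.foldl_nil]
    have hge : ¬ ((i : Int) + 1 < (cs.length : Int)) := by push_cast; omega
    rw [if_neg hge]
    have hgc : PySem.List.pyGet? cs (i : Int) = some c := by
      rw [PySem.List.pyGet?_natCast]
      have h0 : cs[i]? = (cs.drop i)[0]? := by rw [List.getElem?_drop]; norm_num
      rw [h0, hdrop]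
      rfl
    simp [hgc, pairs]
  | c :: d :: t' =>
    intro i res hdrop
    have hlen : i + t'.length + 2 = cs.length := by
      have := congrArg List.length hdrop
      simp at this
      omega
    have hlt : (i : Int) < (cs.length : Int) := by exact_mod_cast by omega
    rw [pyRange2_cons _ _ hlt, List.foldl_cons]
    have hlt1 : ((i : Int) + 1 < (cs.length : Int)) := by push_cast; omega
    rw [if_pos hlt1]
    have hgc : PySem.List.pyGet? cs (i : Int) = some c := by
      rw [PySem.List.pyGet?_natCast]
      have h0 : cs[i]? = (cs.drop i)[0]? := by rw [List.getElem?_drop]; norm_num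
      rw [h0, hdrop]
      rfl
    have hgd : PySem.List.pyGet? cs ((i : Int) + 1) = some d := by
      have : ((i : Int) + 1) = ((i + 1 : Nat) : Int) := by push_cast; try ring
      rw [this, PySem.List.pyGet?_natCast]
      have h1 : cs[i + 1]? = (cs.drop i)[1]? := by
        rw [List.getElem?_drop]
      rw [h1, hdrop]
      rfl
    have hdrop' : cs.drop (i + 2) = t' := by
      have h2 : cs.drop (i + 2) = (cs.drop i).drop 2 := by
        rw [List.drop_drop]
      simp [h2, hdrop]
    have hcast : (i : Int) + 2 = ((i + 2 : Nat) : Int) := by omega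
    rw [hgc, hgd, hcast, lemB cs t' (i + 2) _ hdrop']
    simp [pairs]
termination_by t => t.length

theorem solution_eq_pairs (s : String) : solution s = pairs s.toList := by
  unfold solution
  have := lemA s.toList 0 [] (by omega)
  simpa using this

theorem solution_alt_eq_pairs (s : String) : solution_alt s = pairs s.toList := by
  unfold solution_alt
  have := lemB s.toList s.toList 0 [] (by simp)
  simpa using this

-- ===== VERDICT (by name: the statement is the Claim_ definition above) =====
theorem solution_spec : Claim_equal_solution := by
  intro s _
  unfold Spec_solution
  rw [solution_eq_pairs, solution_alt_eq_pairs]
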